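-- pv_equiv track=rewrite | github.com/teaguesterling/pluckit | src/pluckit/mutations.py | _find_append_insertion_index
-- ===== SOURCE A (Python) =====
-- _CLOSING_BRACE_LINES = frozenset({"}", "};", ");", "]", "];", ")", "});"})
--
-- def _is_closing_brace_line(line: str) -> bool:
--     """Return True if the line's stripped content is purely a closing brace/bracket."""
--     return line.strip() in _CLOSING_BRACE_LINES
--
-- def _find_append_insertion_index(lines: list[str]) -> int:
--     """Return the line index where ``Append`` should insert new code.
--
--     For brace-delimited bodies, this is the index of the closing ``}``
--     line (so the new code lands before it, still inside the block).
--     For Python-style bodies with no explicit closing marker, this is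
--     the end of the list.
--     """
--     # Walk backwards past blank lines to find the last non-blank line
--     for i in range(len(lines) - 1, -1, -1):
--         line = lines[i]
--         if not line.strip():
--             continue
--         if _is_closing_brace_line(line):
--             return i
--         return len(lines)
--     return len(lines)
-- ===== SOURCE B (Python) =====
-- _CLOSING_BRACE_LINES = frozenset({"}", "};", ");", "]", "];", ")", "});"})
--
-- def _is_closing_brace_line(line: str) -> bool:
--     return line.strip() in _CLOSING_BRACE_LINES
--
-- def _find_append_insertion_index(lines: list[str]) -> int:
--     # Forward pass: materialize all non-blank (index, line) pairs, then one branch.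
--     nz = [(i, line) for i, line in enumerate(lines) if line.strip()]
--     if not nz:
--         return len(lines)
--     i, line = nz[-1]
--     return i if _is_closing_brace_line(line) else len(lines)
-- ===== Notes on version B (the rewrite author's own statement) =====
-- stated objective: simpler
-- what changed: Replaces the backward early-exit index loop with a forward comprehension collecting non-blank (index,line) pairs followed by a single branch on the last one.
import Mathlib
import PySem

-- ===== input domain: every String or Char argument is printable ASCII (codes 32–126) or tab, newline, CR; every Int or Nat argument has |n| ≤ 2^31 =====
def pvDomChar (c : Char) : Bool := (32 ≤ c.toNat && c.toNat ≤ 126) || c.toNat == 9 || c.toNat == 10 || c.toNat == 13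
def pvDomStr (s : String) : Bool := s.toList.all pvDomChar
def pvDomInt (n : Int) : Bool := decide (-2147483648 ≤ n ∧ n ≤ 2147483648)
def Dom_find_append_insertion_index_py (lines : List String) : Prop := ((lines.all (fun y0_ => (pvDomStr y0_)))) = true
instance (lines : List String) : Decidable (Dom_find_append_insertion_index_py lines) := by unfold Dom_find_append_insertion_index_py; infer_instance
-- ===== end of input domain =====

-- B replaces A's backward early-exit scan by a forward comprehension of non-blank (index,line) pairs plus one branch (objective: simpler).

-- shared constant set _CLOSING_BRACE_LINES, membership test of _is_closing_brace_line
def pvClosingBraceLine (line : String) : Bool :=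
  PySem.Str.strip line ∈ (["}", "};", ");", "]", "];", ")", "});"] : List String)

-- ===== PORT A =====
-- the 'for i in range(len(lines)-1, -1, -1)' loop: structural recursion counting i+1 down to 0;
-- lines.getD i "" is exact here since the loop only visits i < lines.length
def pvALoop (lines : List String) : Nat → Int
  | 0 => (lines.length : Int)
  | i + 1 =>
    let line := lines.getD i ""
    if PySem.Str.strip line = "" then pvALoop lines i
    else if pvClosingBraceLine line then (i : Int)
    else (lines.length : Int)

def find_append_insertion_index_py (lines : List String) : Int :=
  pvALoop lines lines.length

-- ===== PORT B =====
def find_append_insertion_index_py_alt (lines : List String) : Int :=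
  let nz := (PySem.List.enumerate lines 0).filter (fun p => PySem.Str.strip p.2 ≠ "")
  match nz.getLast? with
  | none => (lines.length : Int)
  | some (i, line) => if pvClosingBraceLine line then i else (lines.length : Int)

-- ===== PRECONDITION & SPEC =====
def Spec_find_append_insertion_index_py (lines : List String) (out : Int) : Prop := out = find_append_insertion_index_py_alt lines
instance (lines : List String) (out : Int) : Decidable (Spec_find_append_insertion_index_py lines out) := by unfold Spec_find_append_insertion_index_py; infer_instance

-- ===== CLAIM (what is proved, stated in full; the proofs are below) =====
def Claim_equal_find_append_insertion_index_py : Prop := ∀ (lines : List String), Dom_find_append_insertion_index_py lines → Spec_find_append_insertion_index_py lines (find_append_insertion_index_py lines)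

-- ===== LEMMAS AND PROOFS =====

-- invariant: after the loop has yet to inspect indices below i, its value is determined by
-- the last non-blank line among the first i lines
theorem pvALoop_eq (lines : List String) :
    ∀ i, i ≤ lines.length →
      pvALoop lines i =
        (match ((PySem.List.enumerate (lines.take i) 0).filter
            (fun p => PySem.Str.strip p.2 ≠ "")).getLast? with
          | none => (lines.length : Int)
          | some (j, line) => if pvClosingBraceLine line then j else (lines.length : Int)) := by
  intro i
  induction i with
  | zero => intro _; simp [pvALoop]
  | succ i ih =>
    intro h
    have hi : i < lines.length := Nat.lt_of_succ_le h
    have htake : lines.take (i + 1) = lines.take i ++ [lines[i]] := by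
      rw [List.take_add_one, List.getElem?_eq_getElem hi]; rfl
    have hlen : (lines.take i).length = i := by simp [Nat.le_of_lt hi]
    rw [htake, PySem.List.enumerate_append, hlen, List.filter_append]
    have hget : lines.getD i "" = lines[i] := List.getD_eq_getElem lines "" hi
    by_cases hb : PySem.Str.strip lines[i] = ""
    · -- blank last line: the appended singleton is filtered out, fall through to i
      have : (PySem.List.enumerate [lines[i]] ((0:Int) + i)).filter
          (fun p => PySem.Str.strip p.2 ≠ "") = [] := by
        simp [PySem.List.enumerate, hb]
      rw [this, List.append_nil]
      have := ih (Nat.le_of_lt hi)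
      simp only [pvALoop]
      rw [hget, if_pos hb]
      exact this
    · -- non-blank last line: it is the last element of the filtered list
      have : (PySem.List.enumerate [lines[i]] ((0:Int) + i)).filter
          (fun p => PySem.Str.strip p.2 ≠ "") = [((i : Int), lines[i])] := by
        simp [PySem.List.enumerate, hb]
      rw [this, List.getLast?_append]
      simp only [pvALoop]
      rw [hget, if_neg hb]
      simp

-- ===== VERDICT (by name: the statement is the Claim_ definition above) =====
theorem find_append_insertion_index_py_spec : Claim_equal_find_append_insertion_index_py := by
  intro lines _
  unfold Spec_find_append_insertion_index_py find_append_insertion_index_py find_append_insertion_index_py_alt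
  have := pvALoop_eq lines lines.length (Nat.le_refl _)
  simpa using this
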